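-- pv_equiv track=rewrite | github.com/SourcM/TextImageSimilarity | main.py | refine_detections
-- ===== SOURCE A (Python) =====
-- import collections
--
-- def refine_detections(dets):
--    #count frequency of detected objects for multiple detections we simply return a plural for instance persons for 2 or more person
--     counter=collections.Counter(dets)
--
--     out = []
--     for item in counter.items():
--         if item[1] > 1:
--             out.append(item[0]+'s')
--         else:
--             out.append(item[0])
--
--     return out
-- ===== SOURCE B (Python) =====
-- def refine_detections(dets):
--     rest = list(dets)
--     out = []
--     while rest:
--         head, tail = rest[0], rest[1:]
--         out.append(head + 's' if head in tail else head)
--         rest = [x for x in tail if x != head]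
--     return out
-- ===== Notes on version B (the rewrite author's own statement) =====
-- stated objective: alternative
-- what changed: Replaces the Counter frequency table with a divide-and-filter loop: repeatedly emit the current head (pluralized iff it reappears in the remaining tail), strip all copies of the head from the working list, and continue on the remainder.
import Mathlib
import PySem

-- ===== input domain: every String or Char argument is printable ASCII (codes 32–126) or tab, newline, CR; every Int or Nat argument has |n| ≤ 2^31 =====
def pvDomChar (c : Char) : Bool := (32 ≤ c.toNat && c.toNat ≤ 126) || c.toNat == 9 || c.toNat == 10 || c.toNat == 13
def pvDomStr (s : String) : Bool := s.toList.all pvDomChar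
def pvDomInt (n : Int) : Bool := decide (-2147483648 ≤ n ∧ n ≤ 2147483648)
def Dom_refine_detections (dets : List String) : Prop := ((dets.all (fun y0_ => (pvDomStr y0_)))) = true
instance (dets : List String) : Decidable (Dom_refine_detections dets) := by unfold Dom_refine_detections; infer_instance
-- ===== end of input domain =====

-- B replaces A's Counter frequency table with a divide-and-filter loop (emit the
-- head pluralized iff it reappears in the tail, strip its copies, loop on the rest)
-- — an alternative decomposition, same return value.


-- ===== PORT A =====
def refine_detections (dets : List String) : List String :=
  let counter := PySem.Dict.counter dets
  counter.items.foldl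
    (fun out item =>
      if item.2 > 1 then out ++ [item.1 ++ "s"] else out ++ [item.1])
    []

-- ===== PORT B =====
/-- B's while loop over the state (rest, out). -/
def pvRefineLoop (rest : List String) (out : List String) : List String :=
  match rest with
  | [] => out
  | head :: tail =>
      pvRefineLoop (tail.filter (fun x => x != head))
        (out ++ [if tail.contains head then head ++ "s" else head])
  termination_by rest.length
  decreasing_by
    simpa using Nat.lt_succ_of_le (List.length_filter_le _ _)

def refine_detections_alt (dets : List String) : List String :=
  pvRefineLoop dets []

-- ===== PRECONDITION & SPEC =====
def Spec_refine_detections (dets : List String) (out : List String) : Prop := out = refine_detections_alt dets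
instance (dets : List String) (out : List String) : Decidable (Spec_refine_detections dets out) := by unfold Spec_refine_detections; infer_instance

-- ===== CLAIM (what is proved, stated in full; the proofs are below) =====
def Claim_equal_refine_detections : Prop := ∀ (dets : List String), Dom_refine_detections dets → Spec_refine_detections dets (refine_detections dets)

-- ===== LEMMAS AND PROOFS =====

/-- Folding `Set.add` skips elements already present: copies of a member `x` of `s`
may be filtered out of the list without changing the result. -/
lemma pvFoldlAdd_filter_mem : ∀ (t : List String) (s : PySem.Set String) (x : String),
    x ∈ s → t.foldl PySem.Set.add s = (t.filter (fun y => y != x)).foldl PySem.Set.add s := by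
  intro t
  induction t with
  | nil => intro s x _; rfl
  | cons y t ih =>
      intro s x hx
      by_cases hyx : y = x
      · subst hyx
        have hadd : PySem.Set.add s y = s := by
          simp [PySem.Set.add, hx]
        simp [ih s y hx, hx]
      · have hmem : x ∈ PySem.Set.add s y := by
          by_cases hy : y ∈ s <;> simp [PySem.Set.add, hy, hx]
        simp [hyx, ih (PySem.Set.add s y) x hmem]

/-- Folding `Set.add` over a list avoiding `a` commutes with a leading `a`. -/
lemma pvFoldlAdd_cons_head : ∀ (t : List String) (a : String) (s : PySem.Set String),
    a ∉ t → t.foldl PySem.Set.add (a :: s) = a :: t.foldl PySem.Set.add s := by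
  intro t
  induction t with
  | nil => intro a s _; rfl
  | cons y t ih =>
      intro a s ha
      have hya : ¬ (y = a) := fun h => ha (by simp [h])
      have hcons : PySem.Set.add (a :: s) y = a :: PySem.Set.add s y := by
        simp only [PySem.Set.add, PySem.Set.contains, List.contains_cons]
        simp [hya]
        split <;> rfl
      rw [List.foldl_cons, hcons, List.foldl_cons,
        ih a (PySem.Set.add s y) (fun h => ha (by simp [h]))]

/-- `set(h::t)` is `h` followed by `set` of the tail with copies of `h` removed. -/
lemma pvOfList_cons (h : String) (t : List String) :
    PySem.Set.ofList (h :: t) = h :: PySem.Set.ofList (t.filter (fun x => x != h)) := by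
  have h1 : PySem.Set.ofList (h :: t) = t.foldl PySem.Set.add [h] := by
    rw [PySem.Set.ofList_eq_foldl]; rfl
  have hmem : h ∈ ([h] : PySem.Set String) := by simp
  have hnot : h ∉ t.filter (fun x => x != h) := by
    simp [List.mem_filter]
  rw [h1, pvFoldlAdd_filter_mem t [h] h hmem,
      show ([h] : PySem.Set String) = h :: [] from rfl,
      pvFoldlAdd_cons_head _ h [] hnot, PySem.Set.ofList_eq_foldl]

/-- A's result as a map over the distinct elements. -/
lemma refine_detections_eq_map (dets : List String) :
    refine_detections dets
      = (PySem.Set.ofList dets).map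
          (fun k => if ((List.count k dets : Int)) > 1 then k ++ "s" else k) := by
  unfold refine_detections
  have hstep : (fun (out : List String) (item : String × Int) =>
      if item.2 > 1 then out ++ [item.1 ++ "s"] else out ++ [item.1])
      = fun out item => out ++ [if item.2 > 1 then item.1 ++ "s" else item.1] := by
    funext out item; split <;> rfl
  rw [hstep, PySem.List.foldl_append_singleton_eq_map, PySem.Dict.items_counter]
  simp [List.map_map, Function.comp]

/-- B's loop result as the same map over the distinct elements. -/
lemma pvRefineLoop_eq_map : ∀ (n : Nat) (dets : List String), dets.length ≤ n →
    ∀ (out : List String),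
    pvRefineLoop dets out
      = out ++ (PySem.Set.ofList dets).map
          (fun k => if 1 < List.count k dets then k ++ "s" else k) := by
  intro n
  induction n with
  | zero =>
      intro dets hlen out
      have : dets = [] := List.eq_nil_of_length_eq_zero (Nat.le_zero.mp hlen)
      subst this; simp [pvRefineLoop]
  | succ n ih =>
      intro dets hlen out
      match dets with
      | [] => simp [pvRefineLoop]
      | h :: t =>
          have hflen : (t.filter (fun x => x != h)).length ≤ n := by
            have := List.length_filter_le (fun x => x != h) t
            simp at hlen; omega
          rw [pvRefineLoop, ih _ hflen, pvOfList_cons]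
          have hmap : ∀ k ∈ PySem.Set.ofList (t.filter (fun x => x != h)),
              (if 1 < List.count k (t.filter (fun x => x != h)) then k ++ "s" else k)
                = (if 1 < List.count k (h :: t) then k ++ "s" else k) := by
            intro k hk
            have hkmem : k ∈ t.filter (fun x => x != h) := by
              rwa [PySem.Set.mem_ofList] at hk
            have hkh : k ≠ h := by
              have := (List.mem_filter.mp hkmem).2
              simpa using this
            have hcnt : List.count k (t.filter (fun x => x != h)) = List.count k (h :: t) := by
              simp [List.count_filter, hkh, Ne.symm hkh]
            rw [hcnt]
          simp only [List.map_cons, List.append_assoc, List.singleton_append,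
            List.append_cancel_left_eq]
          have hh : (if t.contains h = true then h ++ "s" else h)
              = (if 1 < List.count h (h :: t) then h ++ "s" else h) := by
            simp
          rw [hh, List.map_congr_left hmap]

-- ===== VERDICT (by name: the statement is the Claim_ definition above) =====
theorem refine_detections_spec : Claim_equal_refine_detections := by
  intro dets _
  unfold Spec_refine_detections
  rw [refine_detections_eq_map]
  rw [show refine_detections_alt dets = pvRefineLoop dets [] from rfl,
      pvRefineLoop_eq_map dets.length dets le_rfl [], List.nil_append]
  apply List.map_congr_left
  intro k _
  have hiff : ((List.count k dets : Int) > 1) ↔ (1 < List.count k dets) := by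
    exact_mod_cast Iff.rfl
  rw [if_congr hiff rfl rfl]
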